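-- pv_equiv track=rewrite | github.com/mariapanneerrajan/ori-shared-platform | rpa/session_state/clip.py | __generate_clamped_source_frames
-- ===== SOURCE A (Python) =====
-- def __generate_clamped_source_frames(key_in, key_out, media_start, media_end):
--     """
--     Generate source frames list with clamping logic.
--
--     - Frames before media_start are set to media_start value
--     - Frames within media_start to media_end are incremental
--     - Frames after media_end are set to media_end value
--
--     Args:
--         key_in: Start frame of the key range
--         key_out: End frame of the key range
--         media_start: First valid media frame
--         media_end: Last valid media frame
--
--     Returns:
--         List of source frames with clamped values
--     """
--     key_in = media_start if key_in is None else key_in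
--     key_out = media_end if key_out is None else key_out
--     source_frames = []
--     for frame in range(key_in, key_out + 1):
--         if frame < media_start:
--             # Repeat media_start for frames before media range
--             source_frames.append(media_start)
--         elif frame > media_end:
--             # Repeat media_end for frames after media range
--             source_frames.append(media_end)
--         else:
--             # Normal incremental value within media range
--             source_frames.append(frame)
--
--     return source_frames
-- ===== SOURCE B (Python) =====
-- def __generate_clamped_source_frames(key_in, key_out, media_start, media_end):
--     """Segment-counting rebuild: compute the sizes of the clamped head/tail runs
--     and the incremental middle range directly, then concatenate."""
--     lo = media_start if key_in is None else key_in
--     hi = media_end if key_out is None else key_out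
--     if lo > hi:
--         return []
--     n_pre = max(0, min(hi + 1, media_start) - lo)
--     middle = list(range(max(lo, media_start), min(hi, media_end) + 1))
--     n_post = max(0, hi + 1 - max(lo, media_start, media_end + 1))
--     return [media_start] * n_pre + middle + [media_end] * n_post
-- ===== Notes on version B (the rewrite author's own statement) =====
-- stated objective: alternative
-- what changed: Replaces A's per-frame loop with branch tests by a direct segment construction: counts of leading/trailing clamped frames and one incremental middle range, concatenated.
import Mathlib
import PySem

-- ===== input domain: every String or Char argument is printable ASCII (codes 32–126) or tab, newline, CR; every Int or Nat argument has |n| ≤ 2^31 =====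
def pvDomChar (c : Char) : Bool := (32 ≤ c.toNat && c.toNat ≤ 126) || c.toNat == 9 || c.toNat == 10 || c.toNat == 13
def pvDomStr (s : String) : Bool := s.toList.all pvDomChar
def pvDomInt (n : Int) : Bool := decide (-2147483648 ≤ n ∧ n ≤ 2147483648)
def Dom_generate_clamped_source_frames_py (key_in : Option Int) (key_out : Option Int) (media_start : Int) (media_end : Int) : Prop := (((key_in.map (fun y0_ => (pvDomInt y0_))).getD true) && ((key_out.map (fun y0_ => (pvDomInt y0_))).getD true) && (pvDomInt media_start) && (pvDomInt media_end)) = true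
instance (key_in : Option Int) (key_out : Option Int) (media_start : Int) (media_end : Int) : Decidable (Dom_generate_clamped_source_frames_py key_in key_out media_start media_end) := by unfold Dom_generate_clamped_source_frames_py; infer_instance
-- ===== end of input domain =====

-- ===== PORT A =====
-- B rebuilds the same list from three segment counts instead of a per-frame loop (objective: simpler/alternative).
def generate_clamped_source_frames_py (key_in : Option Int) (key_out : Option Int) (media_start : Int) (media_end : Int) : List Int :=
  let ki := key_in.getD media_start
  let ko := key_out.getD media_end
  (PySem.List.pyRange ki (ko + 1) 1).foldl (fun source_frames frame =>
    if frame < media_start then source_frames ++ [media_start]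
    else if frame > media_end then source_frames ++ [media_end]
    else source_frames ++ [frame]) []

-- ===== PORT B =====
def generate_clamped_source_frames_py_alt (key_in : Option Int) (key_out : Option Int) (media_start : Int) (media_end : Int) : List Int :=
  let lo := key_in.getD media_start
  let hi := key_out.getD media_end
  if lo > hi then []
  else
    List.replicate (max 0 (min (hi + 1) media_start - lo)).toNat media_start
      ++ PySem.List.pyRange (max lo media_start) (min hi media_end + 1) 1
      ++ List.replicate (max 0 (hi + 1 - max (max lo media_start) (media_end + 1))).toNat media_end

-- ===== PRECONDITION & SPEC =====
def Spec_generate_clamped_source_frames_py (key_in : Option Int) (key_out : Option Int) (media_start : Int) (media_end : Int) (out : List Int) : Prop := out = generate_clamped_source_frames_py_alt key_in key_out media_start media_end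
instance (key_in : Option Int) (key_out : Option Int) (media_start : Int) (media_end : Int) (out : List Int) : Decidable (Spec_generate_clamped_source_frames_py key_in key_out media_start media_end out) := by unfold Spec_generate_clamped_source_frames_py; infer_instance

-- ===== CLAIM (what is proved, stated in full; the proofs are below) =====
def Claim_equal_generate_clamped_source_frames_py : Prop := ∀ (key_in : Option Int) (key_out : Option Int) (media_start : Int) (media_end : Int), Dom_generate_clamped_source_frames_py key_in key_out media_start media_end → Spec_generate_clamped_source_frames_py key_in key_out media_start media_end (generate_clamped_source_frames_py key_in key_out media_start media_end)

-- ===== LEMMAS AND PROOFS =====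

-- A's loop body, written as one append of a single clamped element.
lemma clamp_step (ms me : Int) (acc : List Int) (f : Int) :
    (if f < ms then acc ++ [ms] else if f > me then acc ++ [me] else acc ++ [f])
      = acc ++ [if f < ms then ms else if f > me then me else f] := by
  split_ifs <;> rfl

-- The closed-form segment decomposition of the clamped map over a frame range.
lemma clamp_map_closed (ms me : Int) : ∀ (n : Nat) (ki ko : Int), (ko + 1 - ki).toNat = n →
    (PySem.List.pyRange ki (ko + 1) 1).map (fun f => if f < ms then ms else if f > me then me else f)
      = List.replicate (max 0 (min (ko + 1) ms - ki)).toNat ms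
          ++ PySem.List.pyRange (max ki ms) (min ko me + 1) 1
          ++ List.replicate (max 0 (ko + 1 - max (max ki ms) (me + 1))).toNat me := by
  intro n
  induction n with
  | zero =>
    intro ki ko h
    have hk : ko + 1 ≤ ki := by omega
    rw [PySem.List.pyRange_one_eq_nil hk,
        PySem.List.pyRange_one_eq_nil (by omega : min ko me + 1 ≤ max ki ms)]
    have h1 : (max 0 (min (ko + 1) ms - ki)).toNat = 0 := by omega
    have h2 : (max 0 (ko + 1 - max (max ki ms) (me + 1))).toNat = 0 := by omega
    simp [h1]
    omega
  | succ n ih =>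
    intro ki ko h
    have hk : ki < ko + 1 := by omega
    rw [PySem.List.pyRange_one_cons hk, List.map_cons, ih (ki + 1) ko (by omega)]
    by_cases h1 : ki < ms
    · -- leading segment: this frame emits ms
      have e1 : (max 0 (min (ko + 1) ms - ki)).toNat
          = (max 0 (min (ko + 1) ms - (ki + 1))).toNat + 1 := by omega
      have e2 : max (ki + 1) ms = max ki ms := by omega
      have e3 : max (max (ki + 1) ms) (me + 1) = max (max ki ms) (me + 1) := by omega
      simp only [if_pos h1, e1, e2, List.replicate_succ, List.cons_append]
    · by_cases h2 : ki > me
      · -- trailing segment: this frame emits me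
        have e1 : (max 0 (min (ko + 1) ms - ki)).toNat = 0 := by omega
        have e1' : (max 0 (min (ko + 1) ms - (ki + 1))).toNat = 0 := by omega
        rw [PySem.List.pyRange_one_eq_nil (by omega : min ko me + 1 ≤ max ki ms),
            PySem.List.pyRange_one_eq_nil (by omega : min ko me + 1 ≤ max (ki + 1) ms)]
        have e2 : (max 0 (ko + 1 - max (max ki ms) (me + 1))).toNat
            = (max 0 (ko + 1 - max (max (ki + 1) ms) (me + 1))).toNat + 1 := by omega
        simp only [if_neg h1, if_pos h2, e1, e1', e2, List.replicate_succ]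
        simp
      · -- middle segment: this frame emits itself
        have e1 : (max 0 (min (ko + 1) ms - ki)).toNat = 0 := by omega
        have e1' : (max 0 (min (ko + 1) ms - (ki + 1))).toNat = 0 := by omega
        have e2 : max ki ms = ki := by omega
        have e2' : max (ki + 1) ms = ki + 1 := by omega
        have e3 : max (max (ki + 1) ms) (me + 1) = max (max ki ms) (me + 1) := by omega
        rw [e1, e1', e3, e2, e2',
            PySem.List.pyRange_one_cons (by omega : ki < min ko me + 1)]
        simp only [if_neg h1, if_neg h2, List.replicate_zero, List.nil_append, List.cons_append]

-- ===== VERDICT (by name: the statement is the Claim_ definition above) =====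
theorem generate_clamped_source_frames_py_spec : Claim_equal_generate_clamped_source_frames_py := by
  intro key_in key_out media_start media_end _
  unfold Spec_generate_clamped_source_frames_py
  unfold generate_clamped_source_frames_py generate_clamped_source_frames_py_alt
  set ki := key_in.getD media_start with hki
  set ko := key_out.getD media_end with hko
  simp only [clamp_step media_start media_end]
  rw [PySem.List.foldl_append_singleton_eq_map]
  rw [clamp_map_closed media_start media_end (ko + 1 - ki).toNat ki ko rfl]
  by_cases hgt : ki > ko
  · rw [if_pos hgt]
    rw [PySem.List.pyRange_one_eq_nil (by omega : min ko media_end + 1 ≤ max ki media_start)]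
    have h1 : (max 0 (min (ko + 1) media_start - ki)).toNat = 0 := by omega
    have h2 : (max 0 (ko + 1 - max (max ki media_start) (media_end + 1))).toNat = 0 := by omega
    simp [h1]
    omega
  · rw [if_neg hgt]
    simp
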